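-- pv_equiv track=rewrite | github.com/ycchae/CodingTest | src/프로그래머스-고득점/완전탐색/모의고사.py | solution
-- ===== SOURCE A (Python) =====
-- def solution(answers):
--     answer = []
--
--     pt1 = [1,2,3,4,5]
--     pt2 = [2,1,2,3,2,4,2,5]
--     pt3 = [3, 3, 1, 1, 2, 2, 4, 4, 5, 5]
--     score = [0,0,0]
--     for idx, a in enumerate(answers):
--         if pt1[idx % len(pt1)] == a: score[0] += 1
--         if pt2[idx % len(pt2)] == a: score[1] += 1
--         if pt3[idx % len(pt3)] == a: score[2] += 1
--
--     max_sc = max(score)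
--     for idx, s in enumerate(score):
--         if s == max_sc: answer.append(idx+1)
--
--     return sorted(answer)
-- ===== SOURCE B (Python) =====
-- def solution(answers):
--     patterns = [[1, 2, 3, 4, 5],
--                 [2, 1, 2, 3, 2, 4, 2, 5],
--                 [3, 3, 1, 1, 2, 2, 4, 4, 5, 5]]
--     # Histogram pass: the three patterns jointly repeat with period lcm(5,8,10)=40,
--     # so one dict keyed by (position mod 40, answer) determines every score.
--     cnt = {}
--     for i, a in enumerate(answers):
--         key = (i % 40, a)
--         cnt[key] = cnt.get(key, 0) + 1
--     scores = [sum(cnt.get((r, p[r % len(p)]), 0) for r in range(40))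
--               for p in patterns]
--     best = max(scores)
--     return [k + 1 for k in range(3) if scores[k] == best]
-- ===== Notes on version B (the rewrite author's own statement) =====
-- stated objective: alternative
-- what changed: A keeps three synchronous cyclic counters while scanning the answers; B instead builds one histogram dict keyed by (index mod 40, answer) in a single pass (40 = lcm of the three pattern periods) and then reads each pattern's score off the histogram with 40 lookups, never rescanning the answers, and selects winners by a range filter instead of A's append loop plus sort.
import Mathlib
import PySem

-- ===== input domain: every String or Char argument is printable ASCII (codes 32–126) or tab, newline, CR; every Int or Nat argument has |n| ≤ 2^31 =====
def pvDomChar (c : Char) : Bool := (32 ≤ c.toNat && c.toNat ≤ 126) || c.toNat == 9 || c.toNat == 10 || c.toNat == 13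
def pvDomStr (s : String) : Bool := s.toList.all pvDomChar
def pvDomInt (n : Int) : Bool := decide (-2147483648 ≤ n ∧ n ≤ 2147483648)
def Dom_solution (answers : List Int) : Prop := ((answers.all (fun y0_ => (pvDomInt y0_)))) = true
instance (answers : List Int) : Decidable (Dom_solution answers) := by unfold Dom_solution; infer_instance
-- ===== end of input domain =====

-- B replaces A's three synchronous cyclic-pattern counters by a histogram pass: one dict keyed by
-- (index mod 40, answer) — 40 = lcm of the pattern periods — from which each score is read off by
-- 40 lookups without touching the answers again (objective: alternative algorithm, same O(n) cost).

-- ===== PORT A =====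
def solution (answers : List Int) : List Int :=
  let pt1 : List Int := [1,2,3,4,5]
  let pt2 : List Int := [2,1,2,3,2,4,2,5]
  let pt3 : List Int := [3,3,1,1,2,2,4,4,5,5]
  let score := (PySem.List.enumerate answers).foldl
    (fun (s : Int × Int × Int) q =>
      (if PySem.List.pyGetD pt1 (PySem.Int.mod q.1 (pt1.length : Int)) 0 == q.2 then s.1 + 1 else s.1,
       if PySem.List.pyGetD pt2 (PySem.Int.mod q.1 (pt2.length : Int)) 0 == q.2 then s.2.1 + 1 else s.2.1,
       if PySem.List.pyGetD pt3 (PySem.Int.mod q.1 (pt3.length : Int)) 0 == q.2 then s.2.2 + 1 else s.2.2))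
    (0, 0, 0)
  let scoreL : List Int := [score.1, score.2.1, score.2.2]
  -- max(score): scoreL is a 3-element literal list, so max? is always `some`; getD never uses its default
  let max_sc := (PySem.List.max? scoreL (fun y => y)).getD 0
  let answer := (PySem.List.enumerate scoreL).foldl
    (fun (acc : List Int) q => if q.2 == max_sc then acc ++ [q.1 + 1] else acc) []
  PySem.List.sorted answer (fun y => y)

-- ===== PORT B =====
-- the histogram loop: cnt[(i % 40, a)] = cnt.get((i % 40, a), 0) + 1
def pvHist (answers : List Int) : PySem.Dict (Int × Int) Int :=
  (PySem.List.enumerate answers).foldl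
    (fun d q => d.insert (PySem.Int.mod q.1 40, q.2)
                  (d.getD (PySem.Int.mod q.1 40, q.2) 0 + 1))
    PySem.Dict.empty

-- sum(cnt.get((r, p[r % len(p)]), 0) for r in range(40))
def pvScoreHist (cnt : PySem.Dict (Int × Int) Int) (p : List Int) : Int :=
  (PySem.List.pyRange 0 40 1).foldl
    (fun acc r => acc + cnt.getD (r, PySem.List.pyGetD p (PySem.Int.mod r (p.length : Int)) 0) 0) 0

def solution_alt (answers : List Int) : List Int :=
  let patterns : List (List Int) := [[1,2,3,4,5],[2,1,2,3,2,4,2,5],[3,3,1,1,2,2,4,4,5,5]]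
  let cnt := pvHist answers
  let scores := patterns.map (fun p => pvScoreHist cnt p)
  -- max(scores): scores always has three elements, so max? is always `some`
  let best := (PySem.List.max? scores (fun y => y)).getD 0
  ((PySem.List.pyRange 0 3 1).filter
      (fun k => PySem.List.pyGetD scores k 0 == best)).map (fun k => k + 1)

-- ===== PRECONDITION & SPEC =====
def Spec_solution (answers : List Int) (out : List Int) : Prop := out = solution_alt answers
instance (answers : List Int) (out : List Int) : Decidable (Spec_solution answers out) := by unfold Spec_solution; infer_instance

-- ===== CLAIM (what is proved, stated in full; the proofs are below) =====
def Claim_equal_solution : Prop := ∀ (answers : List Int), Dom_solution answers → Spec_solution answers (solution answers)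

-- ===== LEMMAS AND PROOFS =====

-- the histogram loop keyed by (i % 40, a) is the plain counting loop over the mapped keys
theorem pv_hist_eq_map (l : List (Int × Int)) (d : PySem.Dict (Int × Int) Int) :
    l.foldl (fun d q => d.insert (PySem.Int.mod q.1 40, q.2)
                (d.getD (PySem.Int.mod q.1 40, q.2) 0 + 1)) d
      = (l.map (fun q => (PySem.Int.mod q.1 40, q.2))).foldl
          (fun d x => d.insert x (d.getD x 0 + 1)) d := by
  induction l generalizing d with
  | nil => rfl
  | cons q t ih => simp only [List.map_cons, List.foldl_cons]; exact ih _

-- the histogram's entry at `key` is the number of enumerated answers mapping to `key`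
theorem pv_hist_getD (answers : List Int) (key : Int × Int) :
    (pvHist answers).getD key 0
      = (((PySem.List.enumerate answers).map (fun q => (PySem.Int.mod q.1 40, q.2))).count key : Int) := by
  unfold pvHist
  rw [pv_hist_eq_map, PySem.Dict.getD_foldl_insert_add_one]
  simp

-- summing the one-hot indicator of (m, a) over r = 0..39 with the paired value g r
theorem pv_one_hot (g : Int → Int) (m a : Int) (h0 : 0 ≤ m) (h40 : m < 40) :
    ((PySem.List.pyRange 0 40 1).map
        (fun r => if (r, g r) = (m, a) then (1:Int) else 0)).sum
      = if g m = a then 1 else 0 := by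
  by_cases h : g m = a
  · have hcongr : (PySem.List.pyRange 0 40 1).map (fun r => if (r, g r) = (m, a) then (1:Int) else 0)
        = (PySem.List.pyRange 0 40 1).map (fun r => if r == m then (1:Int) else 0) := by
      apply List.map_congr_left
      intro r _
      by_cases hr : r = m
      · subst hr; simp [h]
      · simp [hr, Prod.ext_iff]
    rw [hcongr, PySem.List.sum_map_ite_one_zero, h, if_pos rfl]
    have hmem : m ∈ PySem.List.pyRange 0 40 1 := by
      rw [PySem.List.mem_pyRange_one]; exact ⟨h0, h40⟩
    have hcount : List.count m (PySem.List.pyRange 0 40 1) = 1 :=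
      List.count_eq_one_of_mem (PySem.List.nodup_pyRange_one 0 40) hmem
    rw [List.count_eq_countP] at hcount
    rw [hcount]
    norm_num
  · rw [if_neg h]
    apply List.sum_eq_zero
    intro x hx
    simp only [List.mem_map] at hx
    obtain ⟨r, _, hr⟩ := hx
    rw [← hr]
    exact if_neg (fun hc => by rw [Prod.mk.injEq] at hc; exact h (hc.1 ▸ hc.2))

-- sum over the 40 residues of per-key counts = the direct match count of the pattern
theorem pv_sum_count (p : List Int) (hpos : 0 < (p.length : Int)) (hdvd : (p.length : Int) ∣ 40)
    (l : List (Int × Int)) :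
    ((PySem.List.pyRange 0 40 1).map
        (fun r => ((l.map (fun q => (PySem.Int.mod q.1 40, q.2))).count
            (r, PySem.List.pyGetD p (PySem.Int.mod r (p.length : Int)) 0) : Int))).sum
      = ((l.countP (fun q => PySem.List.pyGetD p (PySem.Int.mod q.1 (p.length : Int)) 0 == q.2)) : Int) := by
  induction l with
  | nil => simp
  | cons q t ih =>
    have hsplit : (PySem.List.pyRange 0 40 1).map
        (fun r => (((q :: t).map (fun q => (PySem.Int.mod q.1 40, q.2))).count
            (r, PySem.List.pyGetD p (PySem.Int.mod r (p.length : Int)) 0) : Int))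
        = (PySem.List.pyRange 0 40 1).map
            (fun r => ((t.map (fun q => (PySem.Int.mod q.1 40, q.2))).count
                (r, PySem.List.pyGetD p (PySem.Int.mod r (p.length : Int)) 0) : Int)
              + (if (r, PySem.List.pyGetD p (PySem.Int.mod r (p.length : Int)) 0)
                    = (PySem.Int.mod q.1 40, q.2) then (1:Int) else 0)) := by
      apply List.map_congr_left
      intro r _
      simp only [List.map_cons, List.count_cons, beq_iff_eq]
      push_cast
      split_ifs with h1 h2 h2
      · ring
      · exact absurd h1.symm h2
      · exact absurd h2.symm h1
      · ring
    rw [hsplit, PySem.List.sum_map_add_int, ih]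
    have hmm : PySem.List.pyGetD p (PySem.Int.mod (PySem.Int.mod q.1 40) (p.length : Int)) 0
        = PySem.List.pyGetD p (PySem.Int.mod q.1 (p.length : Int)) 0 := by
      rw [PySem.Int.mod_eq_emod_of_pos (show (0:Int) < 40 by norm_num),
          PySem.Int.mod_eq_emod_of_pos hpos, PySem.Int.mod_eq_emod_of_pos hpos,
          Int.emod_emod_of_dvd q.1 hdvd]
    have h1 : ((PySem.List.pyRange 0 40 1).map
        (fun r => if (r, PySem.List.pyGetD p (PySem.Int.mod r (p.length : Int)) 0)
            = (PySem.Int.mod q.1 40, q.2) then (1:Int) else 0)).sum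
        = if PySem.List.pyGetD p (PySem.Int.mod (PySem.Int.mod q.1 40) (p.length : Int)) 0 = q.2
          then 1 else 0 :=
      pv_one_hot (fun r => PySem.List.pyGetD p (PySem.Int.mod r (p.length : Int)) 0)
        (PySem.Int.mod q.1 40) q.2
        (PySem.Int.mod_nonneg q.1 (by norm_num)) (PySem.Int.mod_lt q.1 (by norm_num))
    rw [h1, hmm, List.countP_cons]
    push_cast
    simp only [beq_iff_eq]


-- B's histogram-based score of a pattern equals A's direct counter for that pattern
theorem pv_score_eq (p : List Int) (hpos : 0 < (p.length : Int)) (hdvd : (p.length : Int) ∣ 40)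
    (answers : List Int) :
    pvScoreHist (pvHist answers) p
      = (PySem.List.enumerate answers).foldl
          (fun acc q => if PySem.List.pyGetD p (PySem.Int.mod q.1 (p.length : Int)) 0 == q.2
                        then acc + 1 else acc) 0 := by
  unfold pvScoreHist
  rw [PySem.List.foldl_add, PySem.List.foldl_count_if, zero_add, zero_add]
  have hcongr : (PySem.List.pyRange 0 40 1).map
      (fun r => (pvHist answers).getD (r, PySem.List.pyGetD p (PySem.Int.mod r (p.length : Int)) 0) 0)
      = (PySem.List.pyRange 0 40 1).map
          (fun r => (((PySem.List.enumerate answers).map (fun q => (PySem.Int.mod q.1 40, q.2))).count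
              (r, PySem.List.pyGetD p (PySem.Int.mod r (p.length : Int)) 0) : Int)) := by
    apply List.map_congr_left
    intro r _
    exact pv_hist_getD answers _
  rw [hcongr, pv_sum_count p hpos hdvd]

-- A's one pass with three counters equals three independent per-pattern counters
theorem pv_trip (l : List (Int × Int)) (a b c : Int) :
    l.foldl
      (fun (s : Int × Int × Int) q =>
        (if PySem.List.pyGetD [1,2,3,4,5] (PySem.Int.mod q.1 (([1,2,3,4,5] : List Int).length : Int)) 0 == q.2 then s.1 + 1 else s.1,
         if PySem.List.pyGetD [2,1,2,3,2,4,2,5] (PySem.Int.mod q.1 (([2,1,2,3,2,4,2,5] : List Int).length : Int)) 0 == q.2 then s.2.1 + 1 else s.2.1,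
         if PySem.List.pyGetD [3,3,1,1,2,2,4,4,5,5] (PySem.Int.mod q.1 (([3,3,1,1,2,2,4,4,5,5] : List Int).length : Int)) 0 == q.2 then s.2.2 + 1 else s.2.2))
      (a, b, c)
    = (l.foldl (fun acc q => if PySem.List.pyGetD [1,2,3,4,5] (PySem.Int.mod q.1 (([1,2,3,4,5] : List Int).length : Int)) 0 == q.2 then acc + 1 else acc) a,
       l.foldl (fun acc q => if PySem.List.pyGetD [2,1,2,3,2,4,2,5] (PySem.Int.mod q.1 (([2,1,2,3,2,4,2,5] : List Int).length : Int)) 0 == q.2 then acc + 1 else acc) b,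
       l.foldl (fun acc q => if PySem.List.pyGetD [3,3,1,1,2,2,4,4,5,5] (PySem.Int.mod q.1 (([3,3,1,1,2,2,4,4,5,5] : List Int).length : Int)) 0 == q.2 then acc + 1 else acc) c) := by
  induction l generalizing a b c with
  | nil => rfl
  | cons h t ih => simp only [List.foldl_cons]; exact ih _ _ _

-- the tails agree for any three scores: max + append loop + sort (A) vs max + range filter (B)
theorem pv_tail (a b c : Int) :
    (let max_sc := (PySem.List.max? [a, b, c] (fun y => y)).getD 0
     let answer := (PySem.List.enumerate ([a, b, c] : List Int)).foldl
       (fun (acc : List Int) q => if q.2 == max_sc then acc ++ [q.1 + 1] else acc) []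
     PySem.List.sorted answer (fun y => y))
    = (let best := (PySem.List.max? ([a, b, c] : List Int) (fun y => y)).getD 0
       ((PySem.List.pyRange 0 3 1).filter
           (fun k => PySem.List.pyGetD [a, b, c] k 0 == best)).map (fun k => k + 1)) := by
  have hmax : (PySem.List.max? [a, b, c] (fun y => y)).getD 0 = max (max a b) c := by
    rw [PySem.List.max?_id_cons]; simp [max_comm, max_left_comm]
  have hrange : PySem.List.pyRange (0:Int) 3 1 = [0, 1, 2] := by decide
  simp only [hmax, hrange, PySem.List.enumerate_cons, PySem.List.enumerate_nil,
    List.foldl_cons, List.foldl_nil, List.filter_cons, List.filter_nil,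
    PySem.List.pyGetD_ofNat', List.getD, List.getElem?_cons_zero, List.getElem?_cons_succ,
    Option.getD_some]
  generalize max (max a b) c = m
  by_cases ha : a = m <;> by_cases hb : b = m <;> by_cases hc : c = m <;>
    simp [ha, hb, hc] <;> decide

-- ===== VERDICT (by name: the statement is the Claim_ definition above) =====
theorem solution_spec : Claim_equal_solution := by
  intro answers _
  show solution answers = solution_alt answers
  unfold solution solution_alt
  simp only [pv_trip, List.map_cons, List.map_nil]
  rw [pv_score_eq [1,2,3,4,5] (by norm_num) (by norm_num) answers,
      pv_score_eq [2,1,2,3,2,4,2,5] (by norm_num) (by norm_num) answers,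
      pv_score_eq [3,3,1,1,2,2,4,4,5,5] (by norm_num) (by norm_num) answers]
  exact pv_tail _ _ _
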